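-- pv_equiv track=rewrite | github.com/Lapommeray/quant-trading-system | advanced_modules/quantum_execution_optimizer.py | _solve_qubo_classical
-- ===== SOURCE A (Python) =====
-- def _solve_qubo_classical(orders, impact):
--     """Classical fallback for QUBO solving"""
--     try:
--         n = len(orders)
--         best_solution = {}
--         best_cost = float('inf')
--
--         for i in range(2**n):
--             solution = {j: (i >> j) & 1 for j in range(n)}
--             cost = sum(orders[j] * impact * solution[j] for j in range(n))
--
--             if cost < best_cost:
--                 best_cost = cost
--                 best_solution = solution
--
--         return best_solution
--     except Exception:
--         return {0: 1, 1: 0}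
-- ===== SOURCE B (Python) =====
-- def _solve_qubo_classical(orders, impact):
--     """Greedy exact minimizer of the separable cost sum(orders[j]*impact*x[j]):
--     bit j is 1 iff its contribution orders[j]*impact is negative (ties -> 0,
--     which is the lowest-index minimizer the brute force picks)."""
--     return {j: (1 if o * impact < 0 else 0) for j, o in enumerate(orders)}
-- ===== Notes on version B (the rewrite author's own statement) =====
-- stated objective: faster
-- what changed: Replaced the O(2^n) brute-force enumeration of all bit vectors by a one-pass greedy that sets bit j iff orders[j]*impact < 0, which is the exact first minimizer of the separable linear cost.
import Mathlib
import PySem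

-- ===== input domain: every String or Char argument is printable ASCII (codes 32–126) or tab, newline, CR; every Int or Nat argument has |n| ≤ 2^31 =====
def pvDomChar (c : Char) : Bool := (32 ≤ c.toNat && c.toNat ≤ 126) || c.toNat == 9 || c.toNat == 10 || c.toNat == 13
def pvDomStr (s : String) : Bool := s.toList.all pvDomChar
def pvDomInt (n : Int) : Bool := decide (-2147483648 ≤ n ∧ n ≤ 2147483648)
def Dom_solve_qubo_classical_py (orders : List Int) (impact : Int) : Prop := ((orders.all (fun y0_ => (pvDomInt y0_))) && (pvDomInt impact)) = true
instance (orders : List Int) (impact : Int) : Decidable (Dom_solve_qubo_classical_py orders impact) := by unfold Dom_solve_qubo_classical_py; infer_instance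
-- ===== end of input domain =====

-- B replaces A's O(2^n) brute-force scan of all bit vectors by a one-pass greedy
-- (bit j = 1 iff orders[j]*impact < 0), the exact first minimizer A finds: faster (asymptotic).


-- ===== PORT A =====
-- (i >> j) & 1 : i, j are the nonnegative ints produced by range, so Nat shifts are exact
def pvBit (i j : Nat) : Int := ((i >>> j) &&& 1 : Nat)

-- range(2**n) and range(n) are ported as List.range (exact: the nonneg ints 0..N-1 in order);
-- best_cost = float('inf') is the `none` state of the Option Int, `some b` a finite best cost;
-- solution[j] in the cost sum is pvBit i j, the value the comprehension stored at key j.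
-- The try/except never fires for ideal ints (no operation below raises), so it is not ported.
def solve_qubo_classical_py (orders : List Int) (impact : Int) : List (Int × Int) :=
  let n := orders.length
  (((List.range (2 ^ n)).foldl (fun best i =>
      let solution : List (Int × Int) := (List.range n).map (fun (j : Nat) => ((j : Int), pvBit i j))
      let cost : Int := ((List.range n).map (fun j => orders.getD j 0 * impact * pvBit i j)).sum
      match best.2 with
      | none => (solution, some cost)            -- cost < inf
      | some b => if cost < b then (solution, some cost) else best)
    (([] : List (Int × Int)), (none : Option Int))).1)

-- ===== PORT B =====
def solve_qubo_classical_py_alt (orders : List Int) (impact : Int) : List (Int × Int) :=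
  (PySem.List.enumerate orders 0).map (fun p => (p.1, if p.2 * impact < 0 then (1 : Int) else 0))

-- ===== PRECONDITION & SPEC =====
def Spec_solve_qubo_classical_py (orders : List Int) (impact : Int) (out : List (Int × Int)) : Prop := out = solve_qubo_classical_py_alt orders impact
instance (orders : List Int) (impact : Int) (out : List (Int × Int)) : Decidable (Spec_solve_qubo_classical_py orders impact out) := by unfold Spec_solve_qubo_classical_py; infer_instance

-- ===== CLAIM (what is proved, stated in full; the proofs are below) =====
def Claim_equal_solve_qubo_classical_py : Prop := ∀ (orders : List Int) (impact : Int), Dom_solve_qubo_classical_py orders impact → Spec_solve_qubo_classical_py orders impact (solve_qubo_classical_py orders impact)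

-- ===== LEMMAS AND PROOFS =====

-- the weight of bit j
def pvW (orders : List Int) (impact : Int) (j : Nat) : Int := orders.getD j 0 * impact

-- the cost A computes for candidate i, and the minimal possible cost
def pvCost (orders : List Int) (impact : Int) (i : Nat) : Int :=
  ((List.range orders.length).map (fun j => orders.getD j 0 * impact * pvBit i j)).sum
def pvM (orders : List Int) (impact : Int) : Int :=
  ((List.range orders.length).map (fun j => min (pvW orders impact j) 0)).sum

-- the greedy mask: bit j set iff pvW j < 0
def pvMask (orders : List Int) (impact : Int) : Nat :=
  match orders with
  | [] => 0
  | o :: r => (if o * impact < 0 then 1 else 0) + 2 * pvMask r impact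

-- A's loop body, named
def pvStep (orders : List Int) (impact : Int) :
    (List (Int × Int) × Option Int) → Nat → (List (Int × Int) × Option Int) := fun best i =>
  let n := orders.length
  let solution : List (Int × Int) := (List.range n).map (fun (j : Nat) => ((j : Int), pvBit i j))
  let cost : Int := ((List.range n).map (fun j => orders.getD j 0 * impact * pvBit i j)).sum
  match best.2 with
  | none => (solution, some cost)
  | some b => if cost < b then (solution, some cost) else best

def pvSol (orders : List Int) (i : Nat) : List (Int × Int) :=
  (List.range orders.length).map (fun (j : Nat) => ((j : Int), pvBit i j))

lemma portA_eq (orders : List Int) (impact : Int) :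
    solve_qubo_classical_py orders impact =
      ((List.range (2 ^ orders.length)).foldl (pvStep orders impact) ([], none)).1 := rfl

lemma pvBit_eq_ite (i j : Nat) : pvBit i j = if i.testBit j then 1 else 0 := by
  rw [pvBit, Nat.and_one_is_mod, Nat.shiftRight_eq_div_pow, Nat.testBit_eq_decide_div_mod_eq]
  rcases Nat.mod_two_eq_zero_or_one (i / 2 ^ j) with h | h <;> simp [h]

lemma pvMask_lt (orders : List Int) (impact : Int) :
    pvMask orders impact < 2 ^ orders.length := by
  induction orders with
  | nil => simp [pvMask]
  | cons o r ih =>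
    simp only [pvMask, List.length_cons, pow_succ]
    split <;> omega

lemma testBit_pvMask (orders : List Int) (impact : Int) (j : Nat) (hj : j < orders.length) :
    (pvMask orders impact).testBit j = decide (orders.getD j 0 * impact < 0) := by
  induction orders generalizing j with
  | nil => simp at hj
  | cons o r ih =>
    cases j with
    | zero =>
      simp only [pvMask, Nat.testBit_zero, List.getD_cons_zero]
      split <;> rename_i h <;> simp [Nat.add_mul_mod_self_left, h]
    | succ j =>
      simp only [pvMask, Nat.testBit_succ, List.getD_cons_succ]
      have h2 : ((if o * impact < 0 then 1 else 0) + 2 * pvMask r impact) / 2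
          = pvMask r impact := by split <;> omega
      rw [h2, ih j (by simpa using hj)]

lemma testBit_pvMask_false (orders : List Int) (impact : Int) (j : Nat)
    (hj : orders.length ≤ j) : (pvMask orders impact).testBit j = false := by
  apply Nat.testBit_eq_false_of_lt
  exact lt_of_lt_of_le (pvMask_lt orders impact)
    (Nat.pow_le_pow_right (by norm_num) hj)

lemma term_le (orders : List Int) (impact : Int) (i j : Nat) :
    min (pvW orders impact j) 0 ≤ orders.getD j 0 * impact * pvBit i j := by
  rw [pvBit_eq_ite, pvW]
  by_cases h : i.testBit j
  · rw [if_pos h, mul_one]; exact min_le_left _ _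
  · rw [if_neg h, mul_zero]; exact min_le_right _ _

lemma pvM_le_pvCost (orders : List Int) (impact : Int) (i : Nat) :
    pvM orders impact ≤ pvCost orders impact i := by
  exact List.sum_le_sum (fun j _ => term_le orders impact i j)

lemma pvCost_mask (orders : List Int) (impact : Int) :
    pvCost orders impact (pvMask orders impact) = pvM orders impact := by
  unfold pvCost pvM
  apply congrArg List.sum
  apply List.map_congr_left
  intro j hj
  rw [List.mem_range] at hj
  rw [pvBit_eq_ite, testBit_pvMask orders impact j hj, pvW]
  by_cases h : orders.getD j 0 * impact < 0 <;>
    simp only [h, decide_true, decide_false, Bool.false_eq_true, if_true, if_false,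
      mul_one, mul_zero] <;> omega

lemma mask_le_of_cost_eq (orders : List Int) (impact : Int) (i : Nat)
    (h : pvCost orders impact i = pvM orders impact) : pvMask orders impact ≤ i := by
  -- every bit of the mask is a bit of i
  have hbits : ∀ j, (pvMask orders impact).testBit j = true → i.testBit j = true := by
    intro j hj
    by_cases hlen : j < orders.length
    · by_contra hib
      have hneg : orders.getD j 0 * impact < 0 := by
        have := testBit_pvMask orders impact j hlen
        rw [hj] at this; exact of_decide_eq_true this.symm
      have hstrict : ((List.range orders.length).map
            (fun j => min (pvW orders impact j) 0)).sum <
          ((List.range orders.length).map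
            (fun j => orders.getD j 0 * impact * pvBit i j)).sum := by
        apply List.sum_lt_sum
        · intro j _; exact term_le orders impact i j
        · refine ⟨j, List.mem_range.mpr hlen, ?_⟩
          simp only [Bool.not_eq_true] at hib
          rw [pvBit_eq_ite, hib, if_neg (by simp), mul_zero, pvW]
          omega
      rw [show ((List.range orders.length).map
            (fun j => orders.getD j 0 * impact * pvBit i j)).sum
          = pvCost orders impact i from rfl, h] at hstrict
      exact absurd hstrict (lt_irrefl _)
    · rw [testBit_pvMask_false orders impact j (le_of_not_gt hlen)] at hj
      exact absurd hj (by simp)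
  have hand : pvMask orders impact &&& i = pvMask orders impact := by
    apply Nat.eq_of_testBit_eq
    intro j
    rw [Nat.testBit_and]
    by_cases hj : (pvMask orders impact).testBit j
    · simp [hj, hbits j hj]
    · simp [hj]
  calc pvMask orders impact = pvMask orders impact &&& i := hand.symm
    _ ≤ i := Nat.and_le_right

lemma pvM_lt_of_lt_mask (orders : List Int) (impact : Int) (i : Nat)
    (h : i < pvMask orders impact) : pvM orders impact < pvCost orders impact i := by
  rcases lt_or_eq_of_le (pvM_le_pvCost orders impact i) with hlt | heq
  · exact hlt
  · exact absurd (mask_le_of_cost_eq orders impact i heq.symm) (by omega)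

-- loop invariant before the mask is reached: best cost (if finite) is strictly above pvM
def pvInv (orders : List Int) (impact : Int) (acc : List (Int × Int) × Option Int) : Prop :=
  acc.2 = none ∨ ∃ c, acc.2 = some c ∧ pvM orders impact < c

lemma pvStep_eq_none (orders : List Int) (impact : Int)
    (acc : List (Int × Int) × Option Int) (i : Nat) (h : acc.2 = none) :
    pvStep orders impact acc i = (pvSol orders i, some (pvCost orders impact i)) := by
  obtain ⟨s, o⟩ := acc
  simp only at h; subst h; rfl

lemma pvStep_eq_some (orders : List Int) (impact : Int)
    (acc : List (Int × Int) × Option Int) (b : Int) (i : Nat) (h : acc.2 = some b) :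
    pvStep orders impact acc i =
      if pvCost orders impact i < b
        then (pvSol orders i, some (pvCost orders impact i)) else acc := by
  obtain ⟨s, o⟩ := acc
  simp only at h; subst h; rfl

lemma phase1 (orders : List Int) (impact : Int) (l : List Nat)
    (hl : ∀ i ∈ l, pvM orders impact < pvCost orders impact i) :
    ∀ acc, pvInv orders impact acc → pvInv orders impact (l.foldl (pvStep orders impact) acc) := by
  induction l with
  | nil => intro acc h; simpa using h
  | cons i l ih =>
    intro acc hacc
    simp only [List.foldl_cons]
    apply ih (fun k hk => hl k (List.mem_cons_of_mem i hk))
    rcases hacc with h | ⟨c, hc, hlt⟩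
    · rw [pvStep_eq_none orders impact acc i h]
      exact Or.inr ⟨_, rfl, hl i (List.mem_cons_self ..)⟩
    · rw [pvStep_eq_some orders impact acc c i hc]
      by_cases hb : pvCost orders impact i < c
      · rw [if_pos hb]
        exact Or.inr ⟨_, rfl, hl i (List.mem_cons_self ..)⟩
      · rw [if_neg hb]
        exact Or.inr ⟨c, hc, hlt⟩

lemma phase3 (orders : List Int) (impact : Int) (l : List Nat) (s : List (Int × Int)) :
    l.foldl (pvStep orders impact) (s, some (pvM orders impact)) = (s, some (pvM orders impact)) := by
  induction l with
  | nil => rfl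
  | cons i l ih =>
    simp only [List.foldl_cons]
    rw [pvStep_eq_some orders impact (s, some (pvM orders impact)) (pvM orders impact) i rfl,
      if_neg (not_lt.mpr (pvM_le_pvCost orders impact i))]
    exact ih

lemma foldl_range_eq (orders : List Int) (impact : Int) :
    ((List.range (2 ^ orders.length)).foldl (pvStep orders impact) ([], none)).1 =
      pvSol orders (pvMask orders impact) := by
  set n := orders.length
  set m := pvMask orders impact with hm
  have hmlt : m < 2 ^ n := pvMask_lt orders impact
  have hsplit : List.range (2 ^ n) = (List.range m ++ [m]) ++
      (List.range (2 ^ n - (m + 1))).map (fun k => (m + 1) + k) := by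
    rw [← List.range_succ, ← List.range_add]
    congr 1; omega
  rw [hsplit, List.foldl_append, List.foldl_append]
  -- phase 1: all i < m keep the invariant
  have h1 : pvInv orders impact ((List.range m).foldl (pvStep orders impact) ([], none)) := by
    apply phase1
    · intro i hi
      exact pvM_lt_of_lt_mask orders impact i (List.mem_range.mp hi)
    · exact Or.inl rfl
  -- phase 2: at i = m the best becomes (pvSol m, some pvM)
  have h2 : (List.foldl (pvStep orders impact)
        ((List.range m).foldl (pvStep orders impact) ([], none)) [m]) =
      (pvSol orders m, some (pvM orders impact)) := by
    simp only [List.foldl_cons, List.foldl_nil]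
    rcases h1 with h | ⟨c, hc, hlt⟩
    · rw [pvStep_eq_none orders impact _ m h, pvCost_mask]
    · rw [pvStep_eq_some orders impact _ c m hc, pvCost_mask, if_pos hlt]
  rw [h2, phase3]

lemma pvSol_mask_eq_alt (orders : List Int) (impact : Int) :
    pvSol orders (pvMask orders impact) = solve_qubo_classical_py_alt orders impact := by
  unfold solve_qubo_classical_py_alt pvSol
  apply List.ext_getElem
  · simp [PySem.List.length_enumerate]
  · intro k h1 h2
    have hk : k < orders.length := by simpa using h1
    simp only [List.getElem_map, List.getElem_range, PySem.List.getElem_enumerate]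
    rw [pvBit_eq_ite, testBit_pvMask orders impact k hk,
      List.getD_eq_getElem orders 0 hk]
    by_cases h : orders[k] * impact < 0 <;> simp [h]

-- ===== VERDICT (by name: the statement is the Claim_ definition above) =====
theorem solve_qubo_classical_py_spec : Claim_equal_solve_qubo_classical_py := by
  intro orders impact _
  unfold Spec_solve_qubo_classical_py
  rw [portA_eq, foldl_range_eq, pvSol_mask_eq_alt]
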